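-- pv_equiv track=rewrite | github.com/wenjinliuu/lotto-Agent | scripts/check_prize.py | count_matches
-- ===== SOURCE A (Python) =====
-- from collections import Counter
--
-- def count_matches(ticket: list[int], draw: list[int]) -> int:
--     counts = Counter(draw or [])
--     hits = 0
--     for number in ticket or []:
--         if counts[number] > 0:
--             counts[number] -= 1
--             hits += 1
--     return hits
-- ===== SOURCE B (Python) =====
-- from collections import Counter
--
-- def count_matches(ticket: list[int], draw: list[int]) -> int:
--     tc = Counter(ticket or [])
--     dc = Counter(draw or [])
--     return sum((tc & dc).values())
-- ===== Notes on version B (the rewrite author's own statement) =====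
-- stated objective: idiomatic
-- what changed: Replaces A's greedy loop that decrements a mutable draw counter once per ticket number with a symmetric count-and-intersect: build both frequency tables once and sum the multiset intersection (min count per shared value); the per-element decrement loop disappears.
import Mathlib
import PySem

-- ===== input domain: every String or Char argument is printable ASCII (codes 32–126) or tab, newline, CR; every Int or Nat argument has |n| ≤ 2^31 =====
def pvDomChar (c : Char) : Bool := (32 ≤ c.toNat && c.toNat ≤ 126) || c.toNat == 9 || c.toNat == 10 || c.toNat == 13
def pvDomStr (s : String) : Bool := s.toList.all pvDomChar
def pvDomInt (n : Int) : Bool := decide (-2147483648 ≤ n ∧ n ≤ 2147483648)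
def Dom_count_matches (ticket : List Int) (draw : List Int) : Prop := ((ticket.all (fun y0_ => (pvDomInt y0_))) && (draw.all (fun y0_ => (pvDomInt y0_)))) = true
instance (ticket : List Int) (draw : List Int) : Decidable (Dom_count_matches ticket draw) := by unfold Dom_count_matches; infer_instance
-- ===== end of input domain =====

-- B replaces A's greedy decrement-one-per-ticket-number loop by building both frequency
-- tables and summing their multiset intersection (objective: idiomatic; same cost).

-- 'xs or []' on a Python list: [] if xs is empty, else xs (appears in both sources)
def pyOrEmpty (xs : List Int) : List Int := if xs.isEmpty then [] else xs

-- ===== PORT A =====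
def count_matches (ticket : List Int) (draw : List Int) : Int :=
  let counts := PySem.Dict.counter (pyOrEmpty draw)           -- counts = Counter(draw or [])
  let s := (pyOrEmpty ticket).foldl (fun (st : PySem.Dict Int Int × Int) number =>
      if st.1.getD number 0 > 0 then                          -- if counts[number] > 0 (Counter lookup defaults to 0)
        (st.1.modify number 0 (· - 1), st.2 + 1)              -- counts[number] -= 1; hits += 1
      else st) (counts, 0)
  s.2

-- ===== PORT B =====
-- 'tc & dc' (Counter intersection) has no PySem primitive; it is ported step for step after
-- CPython's Counter.__and__: for each (elem, cnt) of tc.items(), newcount = min(cnt, dc[elem]),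
-- kept in the result when positive; then sum the resulting values.
def count_matches_alt (ticket : List Int) (draw : List Int) : Int :=
  let tc := PySem.Dict.counter (pyOrEmpty ticket)
  let dc := PySem.Dict.counter (pyOrEmpty draw)
  let inter := tc.items.foldl (fun (d : PySem.Dict Int Int) p =>
      if min p.2 (dc.getD p.1 0) > 0 then d.insert p.1 (min p.2 (dc.getD p.1 0)) else d)
    PySem.Dict.empty
  inter.values.sum

-- ===== PRECONDITION & SPEC =====
def Spec_count_matches (ticket : List Int) (draw : List Int) (out : Int) : Prop := out = count_matches_alt ticket draw
instance (ticket : List Int) (draw : List Int) (out : Int) : Decidable (Spec_count_matches ticket draw out) := by unfold Spec_count_matches; infer_instance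

-- ===== CLAIM (what is proved, stated in full; the proofs are below) =====
def Claim_equal_count_matches : Prop := ∀ (ticket : List Int) (draw : List Int), Dom_count_matches ticket draw → Spec_count_matches ticket draw (count_matches ticket draw)

-- ===== LEMMAS AND PROOFS =====

theorem pyOrEmpty_eq (xs : List Int) : pyOrEmpty xs = xs := by
  cases xs <;> simp [pyOrEmpty]

-- abstract version of A's greedy loop: the draw counts as a function Int → Int
def greedy : List Int → (Int → Int) → Int
  | [], _ => 0
  | a :: t, f => if f a > 0 then 1 + greedy t (Function.update f a (f a - 1)) else greedy t f

-- A's fold equals the abstract greedy on the dict's lookup function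
theorem foldA_eq_greedy (t : List Int) (d : PySem.Dict Int Int) (h : Int) :
    (t.foldl (fun (st : PySem.Dict Int Int × Int) number =>
      if st.1.getD number 0 > 0 then (st.1.modify number 0 (· - 1), st.2 + 1) else st) (d, h)).2
    = h + greedy t (fun v => d.getD v 0) := by
  induction t generalizing d h with
  | nil => simp [greedy]
  | cons a t ih =>
    simp only [List.foldl_cons, greedy]
    by_cases hpos : d.getD a 0 > 0
    · simp only [hpos, if_pos]
      rw [ih]
      have : (fun v => (d.modify a 0 (· - 1)).getD v 0)
           = Function.update (fun v => d.getD v 0) a (d.getD a 0 - 1) := by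
        funext v
        rw [PySem.Dict.getD_modify]
        by_cases hv : v = a <;> simp [hv, Function.update]
      rw [this]; ring
    · simp only [hpos, if_neg, not_false_iff]
      rw [ih]

-- the greedy count: per distinct ticket value, min(ticket count, draw count clipped at 0)
theorem greedy_eq_sum (t : List Int) (f : Int → Int) :
    greedy t f = ∑ v ∈ t.toFinset, min ((t.count v : Int)) (max (f v) 0) := by
  induction t generalizing f with
  | nil => simp [greedy]
  | cons a t ih =>
    have hcount : ∀ v, ((a :: t).count v : Int)
        = (t.count v : Int) + (if v = a then 1 else 0) := by
      intro v
      by_cases hv : v = a <;> simp [hv, Ne.symm]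
    simp only [greedy, List.toFinset_cons]
    by_cases hmem : a ∈ t.toFinset
    · rw [Finset.insert_eq_self.mpr hmem]
      by_cases hpos : f a > 0
      · simp only [hpos, if_pos, ih]
        rw [Finset.sum_eq_sum_diff_singleton_add hmem
              (fun v => min ((a :: t).count v : Int) (max (f v) 0)),
            Finset.sum_eq_sum_diff_singleton_add hmem
              (fun v => min ((t.count v : Int)) (max (Function.update f a (f a - 1) v) 0))]
        have hrest : ∀ v ∈ t.toFinset \ {a},
            min ((t.count v : Int)) (max (Function.update f a (f a - 1) v) 0)
            = min ((a :: t).count v : Int) (max (f v) 0) := by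
          intro v hv
          rcases Finset.mem_sdiff.mp hv with ⟨_, hne⟩
          have hne' : v ≠ a := by simpa using hne
          rw [Function.update_of_ne hne', hcount]
          simp [hne']
        rw [Finset.sum_congr rfl hrest]
        have hca : (0:Int) < t.count a := by
          have := List.count_pos_iff.mpr (List.mem_toFinset.mp hmem)
          exact_mod_cast this
        rw [hcount a, Function.update_self, if_pos rfl]
        omega
      · simp only [hpos, if_neg, not_false_iff, ih]
        apply Finset.sum_congr rfl
        intro v hv
        rw [hcount]
        by_cases hv' : v = a
        · subst hv'; rw [if_pos rfl]; omega
        · simp [hv']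
    · rw [Finset.sum_insert hmem]
      have hca : t.count a = 0 := by
        rw [List.count_eq_zero]
        exact fun h => hmem (List.mem_toFinset.mpr h)
      by_cases hpos : f a > 0
      · simp only [hpos, if_pos, ih]
        have hrest : ∀ v ∈ t.toFinset,
            min ((t.count v : Int)) (max (Function.update f a (f a - 1) v) 0)
            = min ((a :: t).count v : Int) (max (f v) 0) := by
          intro v hv
          have hne : v ≠ a := fun h => hmem (h ▸ hv)
          rw [Function.update_of_ne hne, hcount]
          simp [hne]
        rw [Finset.sum_congr rfl hrest, hcount a, hca, if_pos rfl]
        omega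
      · simp only [hpos, if_neg, not_false_iff, ih]
        have h0 : min ((a :: t).count a : Int) (max (f a) 0) = 0 := by
          rw [hcount a, hca, if_pos rfl]
          omega
        rw [h0, zero_add]
        apply Finset.sum_congr rfl
        intro v hv
        have hne : v ≠ a := fun h => hmem (h ▸ hv)
        rw [hcount]
        simp [hne]

-- a filtered sum equals the full sum when every dropped term is zero
theorem sum_map_filter_eq (l : List Int) (p : Int → Bool) (f : Int → Int)
    (h : ∀ x ∈ l, p x = false → f x = 0) :
    ((l.filter p).map f).sum = (l.map f).sum := by
  induction l with
  | nil => simp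
  | cons a t ih =>
    cases hp : p a with
    | true =>
      simp only [List.filter_cons, hp, if_true, List.map_cons, List.sum_cons]
      rw [ih (fun x hx => h x (List.mem_cons_of_mem a hx))]
    | false =>
      simp only [List.filter_cons, hp, Bool.false_eq_true, if_false, List.map_cons, List.sum_cons]
      rw [h a List.mem_cons_self hp, zero_add,
          ih (fun x hx => h x (List.mem_cons_of_mem a hx))]

-- B's port computes the same distinct-value sum
theorem alt_eq_sum (ticket draw : List Int) :
    count_matches_alt ticket draw
    = ∑ v ∈ ticket.toFinset, min ((ticket.count v : Int)) ((draw.count v : Int)) := by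
  unfold count_matches_alt
  simp only [pyOrEmpty_eq]
  rw [PySem.Dict.items_counter]
  rw [PySem.List.foldl_ite_eq_foldl_filter
        (p := fun p : Int × Int => min p.2 ((PySem.Dict.counter draw).getD p.1 0) > 0)
        (f := fun (d : PySem.Dict Int Int) p => d.insert p.1 (min p.2 ((PySem.Dict.counter draw).getD p.1 0)))]
  rw [List.filter_map]
  set S := PySem.Set.ofList ticket with hS
  set q : Int → Bool := fun k =>
    decide (min ((ticket.count k : Int)) ((PySem.Dict.counter draw).getD k 0) > 0) with hq
  have hfilter : (S.filter ((fun p : Int × Int =>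
        decide (min p.2 ((PySem.Dict.counter draw).getD p.1 0) > 0)) ∘
        (fun k => (k, (ticket.count k : Int))))) = S.filter q := by
    apply List.filter_congr
    intro x _
    simp [hq, Function.comp]
  rw [hfilter]
  have hnodupS : S.Nodup := PySem.Set.nodup_ofList ticket
  have hnodup : ((S.filter q).map (fun k => ((k, (ticket.count k : Int)) : Int × Int)) |>.map Prod.fst).Nodup := by
    simp only [List.map_map]
    have : (Prod.fst ∘ fun k => ((k, (ticket.count k : Int)) : Int × Int)) = id := by
      funext k; rfl
    rw [this, List.map_id]
    exact hnodupS.filter q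
  have hitems := PySem.Dict.items_foldl_insert_fresh
      ((S.filter q).map (fun j => ((j, (ticket.count j : Int)) : Int × Int)))
      Prod.fst (fun p => min p.2 ((PySem.Dict.counter draw).getD p.1 0)) PySem.Dict.empty
      (fun a _ => PySem.Dict.contains_empty _) hnodup
  beta_reduce at hitems
  simp only [PySem.Dict.values]
  rw [hitems]
  simp only [PySem.Dict.empty]
  simp only [List.nil_append, List.map_map, Function.comp_def, PySem.Dict.getD_counter]
  rw [sum_map_filter_eq S q _ ?_]
  · rw [← List.sum_toFinset _ hnodupS]
    apply Finset.sum_congr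
    · apply Finset.ext
      intro v
      simp [hS, List.mem_toFinset, PySem.Set.mem_ofList]
    · intro v _; rfl
  · intro x _ hpx
    have : ¬ (min ((ticket.count x : Int)) ((PySem.Dict.counter draw).getD x 0) > 0) := by
      simpa [hq] using hpx
    simp only [PySem.Dict.getD_counter] at this
    omega

-- ===== VERDICT (by name: the statement is the Claim_ definition above) =====
theorem count_matches_spec : Claim_equal_count_matches := by
  intro ticket draw _
  unfold Spec_count_matches
  unfold count_matches
  simp only [pyOrEmpty_eq]
  rw [foldA_eq_greedy, greedy_eq_sum, zero_add, alt_eq_sum]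
  apply Finset.sum_congr rfl
  intro v hv
  rw [PySem.Dict.getD_counter, max_eq_left (Int.natCast_nonneg _)]
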